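-- pv_equiv track=rewrite | github.com/facebookresearch/BELA | bela/utils/utils.py | weak_tp
-- ===== SOURCE A (Python) =====
-- def weak_tp(guess_entities, gold_entities):
--     tp = 0
--     for pred in guess_entities:
--         for gold in gold_entities:
--             if (
--                 pred[0] == gold[0]
--                 and (
--                     gold[1] <= pred[1] <= gold[1] + gold[2]
--                     or gold[1] <= pred[1] + pred[2] <= gold[1] + gold[2]
--                 )
--                 and pred[3] == gold[3]
--             ):
--                 tp += 1
--
--     return tp
-- ===== SOURCE B (Python) =====
-- def weak_tp(guess_entities, gold_entities):
--     # Group gold intervals by (key0, key3) once, so each prediction only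
--     # scans golds with matching keys instead of the whole gold list.
--     groups = {}
--     for gold in gold_entities:
--         groups.setdefault((gold[0], gold[3]), []).append((gold[1], gold[1] + gold[2]))
--     tp = 0
--     for pred in guess_entities:
--         a = pred[1]
--         b = pred[1] + pred[2]
--         tp += sum(1 for s, e in groups.get((pred[0], pred[3]), ())
--                   if s <= a <= e or s <= b <= e)
--     return tp
-- ===== Notes on version B (the rewrite author's own statement) =====
-- stated objective: faster
-- what changed: B builds a dict grouping gold intervals by their (key0,key3) pair once, then each prediction scans only the golds of its own key group, so the inner scan over all golds (with per-pair key comparisons) disappears.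
import Mathlib
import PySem

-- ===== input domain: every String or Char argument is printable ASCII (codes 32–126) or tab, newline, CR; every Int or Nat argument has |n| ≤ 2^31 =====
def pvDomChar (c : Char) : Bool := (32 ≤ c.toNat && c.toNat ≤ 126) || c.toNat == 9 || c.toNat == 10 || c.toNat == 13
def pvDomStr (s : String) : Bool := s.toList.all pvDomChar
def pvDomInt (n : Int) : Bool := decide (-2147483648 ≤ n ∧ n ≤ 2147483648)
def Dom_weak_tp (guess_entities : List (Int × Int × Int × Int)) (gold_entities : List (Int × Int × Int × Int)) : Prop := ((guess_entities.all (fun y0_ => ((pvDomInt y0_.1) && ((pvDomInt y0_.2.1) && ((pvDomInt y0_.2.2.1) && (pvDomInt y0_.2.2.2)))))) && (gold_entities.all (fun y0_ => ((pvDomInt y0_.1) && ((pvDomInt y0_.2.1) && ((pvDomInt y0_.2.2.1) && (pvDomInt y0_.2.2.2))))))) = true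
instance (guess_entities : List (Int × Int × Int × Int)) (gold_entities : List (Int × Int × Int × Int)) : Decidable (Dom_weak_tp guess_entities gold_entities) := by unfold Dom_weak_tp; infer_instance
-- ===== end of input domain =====

-- B groups gold intervals by (key0, key3) into a dict built once, so each prediction
-- scans only golds of its own key group instead of the whole gold list (objective: faster).

-- ===== PORT A =====
def weak_tp (guess_entities : List (Int × Int × Int × Int)) (gold_entities : List (Int × Int × Int × Int)) : Int :=
  guess_entities.foldl (fun tp pred =>
    gold_entities.foldl (fun tp gold =>
      if pred.1 = gold.1 ∧
         ((gold.2.1 ≤ pred.2.1 ∧ pred.2.1 ≤ gold.2.1 + gold.2.2.1) ∨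
          (gold.2.1 ≤ pred.2.1 + pred.2.2.1 ∧ pred.2.1 + pred.2.2.1 ≤ gold.2.1 + gold.2.2.1)) ∧
         pred.2.2.2 = gold.2.2.2
      then tp + 1 else tp) tp) 0

-- ===== PORT B =====
-- groups.setdefault((gold[0], gold[3]), []).append((gold[1], gold[1] + gold[2]))
def pvGroups (gold_entities : List (Int × Int × Int × Int)) : PySem.Dict (Int × Int) (List (Int × Int)) :=
  gold_entities.foldl (fun d g =>
    d.insert (g.1, g.2.2.2) (d.getD (g.1, g.2.2.2) [] ++ [(g.2.1, g.2.1 + g.2.2.1)])) PySem.Dict.empty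

def weak_tp_alt (guess_entities : List (Int × Int × Int × Int)) (gold_entities : List (Int × Int × Int × Int)) : Int :=
  let groups := pvGroups gold_entities
  guess_entities.foldl (fun tp pred =>
    tp + (((groups.getD (pred.1, pred.2.2.2) []).countP (fun se =>
      decide ((se.1 ≤ pred.2.1 ∧ pred.2.1 ≤ se.2) ∨
              (se.1 ≤ pred.2.1 + pred.2.2.1 ∧ pred.2.1 + pred.2.2.1 ≤ se.2)))) : Int)) 0

-- ===== PRECONDITION & SPEC =====
def Spec_weak_tp (guess_entities : List (Int × Int × Int × Int)) (gold_entities : List (Int × Int × Int × Int)) (out : Int) : Prop := out = weak_tp_alt guess_entities gold_entities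
instance (guess_entities : List (Int × Int × Int × Int)) (gold_entities : List (Int × Int × Int × Int)) (out : Int) : Decidable (Spec_weak_tp guess_entities gold_entities out) := by unfold Spec_weak_tp; infer_instance

-- ===== CLAIM (what is proved, stated in full; the proofs are below) =====
def Claim_equal_weak_tp : Prop := ∀ (guess_entities : List (Int × Int × Int × Int)) (gold_entities : List (Int × Int × Int × Int)), Dom_weak_tp guess_entities gold_entities → Spec_weak_tp guess_entities gold_entities (weak_tp guess_entities gold_entities)

-- ===== LEMMAS AND PROOFS =====

-- the full per-pair condition of A, as a Bool
def pvCond (p g : Int × Int × Int × Int) : Bool :=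
  decide (p.1 = g.1 ∧
    ((g.2.1 ≤ p.2.1 ∧ p.2.1 ≤ g.2.1 + g.2.2.1) ∨
     (g.2.1 ≤ p.2.1 + p.2.2.1 ∧ p.2.1 + p.2.2.1 ≤ g.2.1 + g.2.2.1)) ∧
    p.2.2.2 = g.2.2.2)

-- inner loop of A counts the matching golds
lemma inner_count (p : Int × Int × Int × Int) (gold : List (Int × Int × Int × Int)) (t : Int) :
    gold.foldl (fun tp g =>
      if p.1 = g.1 ∧
         ((g.2.1 ≤ p.2.1 ∧ p.2.1 ≤ g.2.1 + g.2.2.1) ∨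
          (g.2.1 ≤ p.2.1 + p.2.2.1 ∧ p.2.1 + p.2.2.1 ≤ g.2.1 + g.2.2.1)) ∧
         p.2.2.2 = g.2.2.2
      then tp + 1 else tp) t = t + (gold.countP (pvCond p) : Int) := by
  induction gold generalizing t with
  | nil => simp
  | cons g rest ih =>
    rw [List.foldl_cons, ih, List.countP_cons]
    by_cases h : p.1 = g.1 ∧
        ((g.2.1 ≤ p.2.1 ∧ p.2.1 ≤ g.2.1 + g.2.2.1) ∨
         (g.2.1 ≤ p.2.1 + p.2.2.1 ∧ p.2.1 + p.2.2.1 ≤ g.2.1 + g.2.2.1)) ∧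
        p.2.2.2 = g.2.2.2
    · rw [if_pos h, show pvCond p g = true from decide_eq_true h]
      simp
      omega
    · rw [if_neg h, show pvCond p g = false from decide_eq_false h]
      simp

-- the group stored in the dict for key k is exactly the gold intervals whose keys are k
lemma groups_getD (gold : List (Int × Int × Int × Int))
    (d : PySem.Dict (Int × Int) (List (Int × Int))) (k : Int × Int) :
    (gold.foldl (fun d g =>
      d.insert (g.1, g.2.2.2) (d.getD (g.1, g.2.2.2) [] ++ [(g.2.1, g.2.1 + g.2.2.1)])) d).getD k []
    = d.getD k [] ++
      ((gold.filter (fun g => decide ((g.1, g.2.2.2) = k))).map (fun g => (g.2.1, g.2.1 + g.2.2.1))) := by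
  induction gold generalizing d with
  | nil => simp
  | cons g rest ih =>
    simp only [List.foldl_cons, ih, List.filter_cons]
    rw [PySem.Dict.getD_insert]
    by_cases hk : k = (g.1, g.2.2.2)
    · simp [hk, List.append_assoc]
    · have hk' : ¬ ((g.1, g.2.2.2) = k) := fun h => hk h.symm
      simp [hk, hk']

-- counting overlaps inside the key group = counting the full condition over all golds
lemma count_group (p : Int × Int × Int × Int) (gold : List (Int × Int × Int × Int)) :
    ((gold.filter (fun g => decide ((g.1, g.2.2.2) = (p.1, p.2.2.2)))).map
        (fun g => (g.2.1, g.2.1 + g.2.2.1))).countP (fun se =>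
      decide ((se.1 ≤ p.2.1 ∧ p.2.1 ≤ se.2) ∨
              (se.1 ≤ p.2.1 + p.2.2.1 ∧ p.2.1 + p.2.2.1 ≤ se.2)))
    = gold.countP (pvCond p) := by
  induction gold with
  | nil => simp
  | cons g rest ih =>
    by_cases hk : (g.1, g.2.2.2) = (p.1, p.2.2.2)
    · have h1 : g.1 = p.1 := ((Prod.mk.injEq _ _ _ _).mp hk).1
      have h3 : g.2.2.2 = p.2.2.2 := ((Prod.mk.injEq _ _ _ _).mp hk).2
      by_cases ho : (g.2.1 ≤ p.2.1 ∧ p.2.1 ≤ g.2.1 + g.2.2.1) ∨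
          (g.2.1 ≤ p.2.1 + p.2.2.1 ∧ p.2.1 + p.2.2.1 ≤ g.2.1 + g.2.2.1)
      · have hc : pvCond p g = true := decide_eq_true ⟨h1.symm, ho, h3.symm⟩
        simp only [List.filter_cons, decide_eq_true hk, if_true, List.map_cons,
          List.countP_cons, ih, hc, decide_eq_true ho]
      · have hc : pvCond p g = false := by
          apply decide_eq_false; rintro ⟨-, o, -⟩; exact ho o
        simp only [List.filter_cons, decide_eq_true hk, if_true, List.map_cons,
          List.countP_cons, ih, hc, decide_eq_false ho]
    · have hc : pvCond p g = false := by
        apply decide_eq_false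
        rintro ⟨a, -, c⟩
        exact hk (by rw [← a, ← c])
      have hkf : (decide ((g.1, g.2.2.2) = (p.1, p.2.2.2))) = false := decide_eq_false hk
      simp only [List.filter_cons, hkf, Bool.false_eq_true, if_false, List.countP_cons, hc]
      simpa using ih

-- outer loops agree from any accumulator
lemma outer_eq (guess gold : List (Int × Int × Int × Int)) (t : Int) :
    guess.foldl (fun tp pred =>
      gold.foldl (fun tp g =>
        if pred.1 = g.1 ∧
           ((g.2.1 ≤ pred.2.1 ∧ pred.2.1 ≤ g.2.1 + g.2.2.1) ∨
            (g.2.1 ≤ pred.2.1 + pred.2.2.1 ∧ pred.2.1 + pred.2.2.1 ≤ g.2.1 + g.2.2.1)) ∧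
           pred.2.2.2 = g.2.2.2
        then tp + 1 else tp) tp) t
    = guess.foldl (fun tp pred =>
        tp + ((((pvGroups gold).getD (pred.1, pred.2.2.2) []).countP (fun se =>
          decide ((se.1 ≤ pred.2.1 ∧ pred.2.1 ≤ se.2) ∨
                  (se.1 ≤ pred.2.1 + pred.2.2.1 ∧ pred.2.1 + pred.2.2.1 ≤ se.2)))) : Int)) t := by
  induction guess generalizing t with
  | nil => rfl
  | cons p rest ih =>
    have hg : ((pvGroups gold).getD (p.1, p.2.2.2) []).countP (fun se =>
        decide ((se.1 ≤ p.2.1 ∧ p.2.1 ≤ se.2) ∨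
                (se.1 ≤ p.2.1 + p.2.2.1 ∧ p.2.1 + p.2.2.1 ≤ se.2)))
        = gold.countP (pvCond p) := by
      rw [pvGroups, groups_getD]
      simpa using count_group p gold
    rw [List.foldl_cons, List.foldl_cons, inner_count, ih, hg]

-- ===== VERDICT (by name: the statement is the Claim_ definition above) =====
theorem weak_tp_spec : Claim_equal_weak_tp := by
  intro guess gold _
  unfold Spec_weak_tp weak_tp weak_tp_alt
  exact outer_eq guess gold 0
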